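-- pv_equiv track=rewrite | github.com/leibenjamin/sec-narrative-drift | scripts/sec_metrics.py | has_repeated_tokens
-- ===== SOURCE A (Python) =====
-- from typing import Any, Mapping, Optional, Sequence, TypedDict, cast
--
-- def has_repeated_tokens(tokens: Sequence[str]) -> bool:
--     seen: set[str] = set()
--     for token in tokens:
--         if not token:
--             continue
--         if token in seen:
--             return True
--         seen.add(token)
--     return False
-- ===== SOURCE B (Python) =====
-- def has_repeated_tokens(tokens):
--     ordered = sorted(t for t in tokens if t)
--     return any(a == b for a, b in zip(ordered, ordered[1:]))
-- ===== Notes on version B (the rewrite author's own statement) =====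
-- stated objective: alternative
-- what changed: B sorts the non-empty tokens and detects a duplicate as an adjacent equal pair in the sorted list, instead of A's one-pass hash-set scan with an early return.
import Mathlib
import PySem

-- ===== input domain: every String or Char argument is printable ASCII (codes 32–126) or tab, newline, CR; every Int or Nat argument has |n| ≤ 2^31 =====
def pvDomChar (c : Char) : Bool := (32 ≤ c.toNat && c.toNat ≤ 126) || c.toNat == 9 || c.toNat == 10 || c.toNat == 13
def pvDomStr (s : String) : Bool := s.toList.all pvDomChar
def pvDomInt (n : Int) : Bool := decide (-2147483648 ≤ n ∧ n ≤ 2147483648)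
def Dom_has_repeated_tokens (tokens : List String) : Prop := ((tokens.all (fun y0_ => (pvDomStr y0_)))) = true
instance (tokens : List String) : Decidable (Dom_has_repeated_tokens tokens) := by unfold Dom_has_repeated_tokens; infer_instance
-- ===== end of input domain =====

-- B sorts the non-empty tokens and looks for an adjacent equal pair, instead of
-- A's one-pass seen-set scan with an early return; same return value, no speed claim.

-- ===== PORT A =====
-- the loop over tokens with the mutable 'seen' set and early 'return True'
def hrtLoopA : List String → PySem.Set String → Bool
  | [], _ => false
  | token :: rest, seen =>
    if token = "" then hrtLoopA rest seen
    else if PySem.Set.contains seen token then true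
    else hrtLoopA rest (PySem.Set.add seen token)

def has_repeated_tokens (tokens : List String) : Bool :=
  hrtLoopA tokens PySem.Set.empty

-- ===== PORT B =====
-- any(a == b for a, b in zip(ordered, ordered[1:])): adjacent-pair scan
def hrtAdjEq : List String → Bool
  | a :: b :: rest => a == b || hrtAdjEq (b :: rest)
  | _ => false

def has_repeated_tokens_alt (tokens : List String) : Bool :=
  let ordered := PySem.List.sorted (tokens.filter (fun t => !(t == ""))) (fun x => x) false
  hrtAdjEq ordered

-- ===== PRECONDITION & SPEC =====
def Spec_has_repeated_tokens (tokens : List String) (out : Bool) : Prop := out = has_repeated_tokens_alt tokens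
instance (tokens : List String) (out : Bool) : Decidable (Spec_has_repeated_tokens tokens out) := by unfold Spec_has_repeated_tokens; infer_instance

-- ===== CLAIM (what is proved, stated in full; the proofs are below) =====
def Claim_equal_has_repeated_tokens : Prop := ∀ (tokens : List String), Dom_has_repeated_tokens tokens → Spec_has_repeated_tokens tokens (has_repeated_tokens tokens)

-- ===== LEMMAS AND PROOFS =====

-- invariant of A's loop: with a duplicate-free 'seen', it reports exactly
-- "seen ++ (non-empty tokens of l) contains a repeat"
lemma hrtLoopA_iff (l : List String) (seen : PySem.Set String) (hseen : seen.Nodup) :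
    hrtLoopA l seen = true ↔ ¬ (seen ++ l.filter (fun t => !(t == ""))).Nodup := by
  induction l generalizing seen with
  | nil => simp [hrtLoopA, hseen]
  | cons t rest ih =>
    by_cases ht : t = ""
    · simp only [hrtLoopA, List.filter_cons, ht]
      simpa using ih seen hseen
    · by_cases hmem : t ∈ seen
      · have hc : PySem.Set.contains seen t = true := (PySem.Set.contains_iff seen t).2 hmem
        simp only [hrtLoopA, if_neg ht, hc, List.filter_cons]
        have : ¬ (seen ++ (t :: rest.filter (fun t => !(t == "")))).Nodup := by
          intro hnd
          rcases List.nodup_append.1 hnd with ⟨_, _, hdisj⟩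
          exact hdisj t hmem t (by simp) rfl
        simp [ht, this]
      · have hc : PySem.Set.contains seen t = false := by
          by_contra h
          exact hmem ((PySem.Set.contains_iff seen t).1 (by simpa using h))
        have hadd : PySem.Set.add seen t = seen ++ [t] := PySem.Set.add_of_not_mem hmem
        have hseen' : (seen ++ [t]).Nodup := by
          rw [List.nodup_append]
          refine ⟨hseen, List.nodup_singleton t, ?_⟩
          intro a ha b hb
          simp only [List.mem_singleton] at hb
          subst hb; intro h; subst h; exact hmem ha
        simp only [hrtLoopA, if_neg ht, hc, Bool.false_eq_true, if_false, hadd, List.filter_cons]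
        rw [ih (seen ++ [t]) hseen']
        simp [ht, List.append_assoc]

-- on a (≤)-sorted list, an adjacent equal pair exists exactly when the list has a duplicate
lemma hrtAdjEq_iff (l : List String) (hl : l.Pairwise (· ≤ ·)) :
    hrtAdjEq l = true ↔ ¬ l.Nodup := by
  induction l with
  | nil => simp [hrtAdjEq]
  | cons a t ih =>
    cases t with
    | nil => simp [hrtAdjEq]
    | cons b rest =>
      rcases List.pairwise_cons.1 hl with ⟨hale, htail⟩
      by_cases hab : a = b
      · subst hab
        have : ¬ (a :: a :: rest).Nodup := by
          intro h; exact (List.nodup_cons.1 h).1 (by simp)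
        simp [hrtAdjEq, this]
      · have halt : a < b := lt_of_le_of_ne (hale b (by simp)) hab
        have hnotmem : a ∉ b :: rest := by
          intro hmem
          rcases List.mem_cons.1 hmem with h | h
          · exact hab h
          · have hble : b ≤ a := (List.pairwise_cons.1 htail).1 a h
            exact absurd hble (not_le.2 halt)
        have : (a :: b :: rest).Nodup ↔ (b :: rest).Nodup := by
          simp [List.nodup_cons, hnotmem]
        rw [show hrtAdjEq (a :: b :: rest) = ((a == b) || hrtAdjEq (b :: rest)) from rfl]
        simp only [this, Bool.or_eq_true, beq_iff_eq]
        rw [ih htail]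
        tauto

-- ===== VERDICT (by name: the statement is the Claim_ definition above) =====
theorem has_repeated_tokens_spec : Claim_equal_has_repeated_tokens := by
  intro tokens _
  show has_repeated_tokens tokens = has_repeated_tokens_alt tokens
  rw [Bool.eq_iff_iff]
  rw [has_repeated_tokens, hrtLoopA_iff tokens PySem.Set.empty List.nodup_nil]
  show _ ↔ hrtAdjEq (PySem.List.sorted (tokens.filter (fun t => !(t == ""))) (fun x => x) false) = true
  rw [hrtAdjEq_iff _ (by simpa using PySem.List.sorted_pairwise (tokens.filter (fun t => !(t == ""))) (fun x => x))]
  rw [(PySem.List.sorted_perm (tokens.filter (fun t => !(t == ""))) (fun x => x) false).nodup_iff]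
  simp [PySem.Set.empty]
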